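-- pv_equiv track=rewrite | github.com/travelLynz/homophily_satisfaction | Code/profiles.py | inject_OOVs
-- ===== SOURCE A (Python) =====
-- OOV = "<OOV>"
--
-- def inject_OOVs(data):
--     """
--     Uses a heuristic to inject OOV symbols into a dataset.
--     Args:
--         data: the sequence of words to inject OOVs into.
--
--     Returns: the new sequence with OOV symbols injected.
--     """
--     seen = set()
--     result = []
--     for word in data:
--         if word in seen:
--             result.append(word)
--         else:
--             result.append(OOV)
--             seen.add(word)
--     return result
-- ===== SOURCE B (Python) =====
-- OOV = "<OOV>"
--
-- def inject_OOVs(data):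
--     """Two-pass re-implementation: build a table of each word's first index,
--     then emit OOV exactly at those positions."""
--     data = list(data)
--     firsts = {}
--     for i, word in enumerate(data):
--         if word not in firsts:
--             firsts[word] = i
--     return [OOV if firsts[word] == i else word for i, word in enumerate(data)]
-- ===== Notes on version B (the rewrite author's own statement) =====
-- stated objective: alternative
-- what changed: Replaces the single pass with a running seen-set by an index-table decomposition: one pass records each word's first index in a dict, a second position-aware pass emits OOV exactly where the current index equals that first index.
import Mathlib
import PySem

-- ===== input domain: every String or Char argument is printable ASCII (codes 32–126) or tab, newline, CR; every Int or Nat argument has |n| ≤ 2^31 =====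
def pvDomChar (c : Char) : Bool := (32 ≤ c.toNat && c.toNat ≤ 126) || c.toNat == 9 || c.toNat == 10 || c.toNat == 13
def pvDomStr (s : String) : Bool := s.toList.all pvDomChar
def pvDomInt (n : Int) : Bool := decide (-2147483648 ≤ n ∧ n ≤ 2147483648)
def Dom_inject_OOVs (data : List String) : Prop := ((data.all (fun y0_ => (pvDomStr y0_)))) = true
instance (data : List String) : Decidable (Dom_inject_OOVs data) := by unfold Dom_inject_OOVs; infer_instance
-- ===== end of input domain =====

-- B replaces A's running seen-set single pass by a two-pass index-table decomposition (one pass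
-- records each word's first index, a second enumerate pass emits OOV where index = first index).

-- ===== PORT A =====
-- loop body of A: append word if already seen, else append OOV and add word to seen
def pvStepA (st : PySem.Set String × List String) (word : String) :
    PySem.Set String × List String :=
  if PySem.Set.contains st.1 word then (st.1, st.2 ++ [word])
  else (PySem.Set.add st.1 word, st.2 ++ ["<OOV>"])

def inject_OOVs (data : List String) : List String :=
  (data.foldl pvStepA (PySem.Set.empty, [])).2

-- ===== PORT B =====
-- first pass of B: record the first index of each word ('if word not in firsts: firsts[word] = i')
def pvStepB (d : PySem.Dict String Int) (p : Int × String) : PySem.Dict String Int :=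
  if d.contains p.2 then d else d.insert p.2 p.1

def inject_OOVs_alt (data : List String) : List String :=
  let firsts := (PySem.List.enumerate data).foldl pvStepB PySem.Dict.empty
  -- 'firsts[word] == i': the word itself was enumerated, so the lookup always succeeds
  (PySem.List.enumerate data).map
    (fun p => if firsts.get? p.2 = some p.1 then "<OOV>" else p.2)

-- ===== PRECONDITION & SPEC =====
def Spec_inject_OOVs (data : List String) (out : List String) : Prop := out = inject_OOVs_alt data
instance (data : List String) (out : List String) : Decidable (Spec_inject_OOVs data out) := by unfold Spec_inject_OOVs; infer_instance

-- ===== CLAIM (what is proved, stated in full; the proofs are below) =====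
def Claim_equal_inject_OOVs : Prop := ∀ (data : List String), Dom_inject_OOVs data → Spec_inject_OOVs data (inject_OOVs data)

-- ===== LEMMAS AND PROOFS =====

-- pvStepB never changes an existing key
lemma pvStepB_mono (l : List (Int × String)) :
    ∀ (d : PySem.Dict String Int) (w : String), (d.get? w).isSome →
      (l.foldl pvStepB d).get? w = d.get? w := by
  induction l with
  | nil => intro d w _; rfl
  | cons p l ih =>
      intro d w hw
      simp only [List.foldl_cons, pvStepB]
      by_cases hc : d.contains p.2
      · rw [if_pos hc]; exact ih d w hw
      · rw [if_neg hc]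
        by_cases he : w = p.2
        · exfalso
          rw [PySem.Dict.contains_eq_isSome_get?, ← he] at hc
          simp [hw] at hc
        · rw [ih _ _ (by rw [PySem.Dict.get?_insert_of_ne _ _ he]; exact hw),
              PySem.Dict.get?_insert_of_ne _ _ he]

lemma pv_main (rest : List String) :
    ∀ (seen : PySem.Set String) (acc : List String) (d : PySem.Dict String Int) (n : Int),
      (∀ w, PySem.Set.contains seen w = d.contains w) →
      (∀ w i, d.get? w = some i → i < n) →
      (rest.foldl pvStepA (seen, acc)).2
        = acc ++ (PySem.List.enumerate rest n).map
            (fun p => if ((PySem.List.enumerate rest n).foldl pvStepB d).get? p.2 = some p.1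
                      then "<OOV>" else p.2) := by
  induction rest with
  | nil => intro seen acc d n _ _; simp [PySem.List.enumerate_nil]
  | cons w ws ih =>
      intro seen acc d n h1 h2
      rw [PySem.List.enumerate_cons]
      simp only [List.foldl_cons, List.map_cons, pvStepA]
      have hbc : PySem.Set.contains seen w = d.contains w := h1 w
      by_cases hc : d.contains w = true
      · -- seen before: step of B keeps d; A appends the word
        have hA : pvStepB d (n, w) = d := by simp [pvStepB, hc]
        simp only [hA]
        rw [hbc, hc, if_pos rfl]
        obtain ⟨j, hj⟩ : ∃ j, d.get? w = some j := by
          rw [PySem.Dict.contains_eq_isSome_get?] at hc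
          exact Option.isSome_iff_exists.mp hc
        have hfinal : ((PySem.List.enumerate ws (n+1)).foldl pvStepB d).get? w = some j := by
          rw [pvStepB_mono _ d w (by simp [hj])]; exact hj
        have hne : ¬ (((PySem.List.enumerate ws (n+1)).foldl pvStepB d).get? w = some n) := by
          rw [hfinal]
          have := h2 w j hj
          simp; omega
        rw [if_neg hne]
        have := ih seen (acc ++ [w]) d (n+1) h1
          (fun w' i hi => lt_trans (h2 w' i hi) (by omega))
        simpa [List.append_assoc] using this
      · -- first occurrence: B inserts w ↦ n; A appends OOV and records w
        have hA : pvStepB d (n, w) = d.insert w n := by simp [pvStepB, hc]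
        simp only [hA]
        rw [hbc, if_neg hc]
        have hfinal : ((PySem.List.enumerate ws (n+1)).foldl pvStepB (d.insert w n)).get? w
            = some n := by
          rw [pvStepB_mono _ _ w (by simp [PySem.Dict.get?_insert_self])]
          exact PySem.Dict.get?_insert_self d w n
        rw [if_pos hfinal]
        have h1' : ∀ w', PySem.Set.contains (PySem.Set.add seen w) w'
            = (d.insert w n).contains w' := by
          intro w'
          rw [Bool.eq_iff_iff]
          rw [PySem.Set.contains_iff, PySem.Set.mem_add, PySem.Dict.contains_insert]
          constructor
          · rintro (hm | he)
            · rw [← PySem.Set.contains_iff, h1] at hm; simp [hm]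
            · simp [he]
          · intro h
            rcases Bool.or_eq_true_iff.mp h with he | hm
            · right; exact beq_iff_eq.mp he
            · left; rw [← PySem.Set.contains_iff, h1]; exact hm
        have h2' : ∀ w' i, (d.insert w n).get? w' = some i → i < n + 1 := by
          intro w' i hi
          by_cases he : w' = w
          · subst he
            rw [PySem.Dict.get?_insert_self] at hi
            injection hi with h
            omega
          · rw [PySem.Dict.get?_insert_of_ne _ _ he] at hi
            exact lt_trans (h2 w' i hi) (by omega)
        have := ih (PySem.Set.add seen w) (acc ++ ["<OOV>"]) (d.insert w n) (n+1) h1' h2'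
        simpa [List.append_assoc] using this

-- ===== VERDICT (by name: the statement is the Claim_ definition above) =====
theorem inject_OOVs_spec : Claim_equal_inject_OOVs := by
  intro data _
  unfold Spec_inject_OOVs inject_OOVs inject_OOVs_alt
  have := pv_main data PySem.Set.empty [] PySem.Dict.empty 0
    (fun w => by simp [PySem.Set.contains, PySem.Set.empty, PySem.Dict.contains_empty])
    (fun w i hi => by simp [PySem.Dict.get?_empty] at hi)
  simpa using this
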